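-- pv_equiv track=rewrite | github.com/peter-fusek/google-contacts-refiner | followup_scorer.py | _get_last_activity
-- ===== SOURCE A (Python) =====
-- from typing import Optional
--
-- def _get_last_activity(
--     rn: str,
--     emails: set[str],
--     interactions: dict[str, dict],
-- ) -> tuple[Optional[str], int]:
--     """Get last interaction date and count for a contact across all emails.
--
--     Returns (last_date, interaction_count) where interaction_count counts
--     distinct signal types (1 for email exists, 1 for meeting exists).
--     """
--     latest_date = None
--     has_email = False
--     has_meeting = False
--
--     for email in emails:
--         data = interactions.get(email, {})
--         if isinstance(data, str):
--             data = {"last_email": {"date": data, "subject": "", "snippet": ""}}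
--
--         le = data.get("last_email", {})
--         if le and le.get("date"):
--             has_email = True
--             if not latest_date or le["date"] > latest_date:
--                 latest_date = le["date"]
--
--         lm = data.get("last_meeting", {})
--         if lm and lm.get("date"):
--             has_meeting = True
--             if not latest_date or lm["date"] > latest_date:
--                 latest_date = lm["date"]
--
--     interaction_count = int(has_email) + int(has_meeting)
--     return latest_date, interaction_count
-- ===== SOURCE B (Python) =====
-- from typing import Optional
--
--
-- def _signal_date(data: dict, key: str) -> Optional[str]:
--     d = data.get(key, {})
--     if d and d.get("date"):
--         return d["date"]
--     return None
--
--
-- def _get_last_activity(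
--     rn: str,
--     emails: set[str],
--     interactions: dict[str, dict],
-- ) -> tuple[Optional[str], int]:
--     """Collect-then-reduce: gather all email/meeting dates, then take max."""
--     datas = []
--     for email in emails:
--         data = interactions.get(email, {})
--         if isinstance(data, str):
--             data = {"last_email": {"date": data, "subject": "", "snippet": ""}}
--         datas.append(data)
--     email_dates = [x for x in (_signal_date(d, "last_email") for d in datas) if x is not None]
--     meeting_dates = [x for x in (_signal_date(d, "last_meeting") for d in datas) if x is not None]
--     all_dates = email_dates + meeting_dates
--     latest = max(all_dates) if all_dates else None
--     return latest, int(bool(email_dates)) + int(bool(meeting_dates))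
-- ===== Notes on version B (the rewrite author's own statement) =====
-- stated objective: simpler
-- what changed: Replaced the fused accumulation loop (running max + two mutable flags) with a map/filter/reduce pipeline: collect email and meeting dates into two lists, then take max() and derive the flags from list non-emptiness.
import Mathlib
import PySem

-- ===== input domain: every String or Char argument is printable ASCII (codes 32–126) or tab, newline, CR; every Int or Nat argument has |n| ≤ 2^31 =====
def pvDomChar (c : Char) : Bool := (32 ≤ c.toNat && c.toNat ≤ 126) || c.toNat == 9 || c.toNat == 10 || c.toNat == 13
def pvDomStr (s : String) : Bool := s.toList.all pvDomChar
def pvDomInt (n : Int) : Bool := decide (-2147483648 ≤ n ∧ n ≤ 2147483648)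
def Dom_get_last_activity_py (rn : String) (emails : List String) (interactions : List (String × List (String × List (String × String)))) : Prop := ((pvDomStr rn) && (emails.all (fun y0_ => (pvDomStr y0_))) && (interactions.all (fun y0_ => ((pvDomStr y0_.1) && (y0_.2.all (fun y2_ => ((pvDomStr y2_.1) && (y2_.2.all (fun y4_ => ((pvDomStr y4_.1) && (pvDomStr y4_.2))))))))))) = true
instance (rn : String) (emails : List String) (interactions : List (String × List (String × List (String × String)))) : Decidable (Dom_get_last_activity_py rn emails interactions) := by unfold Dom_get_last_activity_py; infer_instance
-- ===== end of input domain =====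

-- B replaces A's fused loop (running max + two flags) by a collect-then-reduce pipeline
-- (gather the date lists, then max and non-emptiness); same cost, simpler decomposition.
-- Note: A's `isinstance(data, str)` normalization branch is unreachable under the typed
-- domain (interaction values are dicts here), so neither port carries it.

-- ===== PORT A =====
-- `if not latest_date or d > latest_date: latest_date = d` (None and "" are falsy)
def pvAUpd (latest : Option String) (d : String) : Option String :=
  match latest with
  | none => some d
  | some l => if l = "" ∨ l < d then some d else some l

-- one iteration of A's `for email in emails` body, state = (latest_date, has_email, has_meeting)
def pvAStep (interactions : List (String × List (String × List (String × String))))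
    (st : Option String × Bool × Bool) (email : String) : Option String × Bool × Bool :=
  let data := (PySem.Dict.mk interactions).getD email []
  let le := (PySem.Dict.mk data).getD "last_email" []
  let st1 := if le ≠ [] ∧ ((PySem.Dict.mk le).get? "date").getD "" ≠ "" then
      (pvAUpd st.1 ((PySem.Dict.mk le).getD "date" ""), true, st.2.2) else st
  let lm := (PySem.Dict.mk data).getD "last_meeting" []
  if lm ≠ [] ∧ ((PySem.Dict.mk lm).get? "date").getD "" ≠ "" then
      (pvAUpd st1.1 ((PySem.Dict.mk lm).getD "date" ""), st1.2.1, true) else st1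

def get_last_activity_py (rn : String) (emails : List String) (interactions : List (String × List (String × List (String × String)))) : Option String × Int :=
  let st := emails.foldl (pvAStep interactions) (none, false, false)
  (st.1, (if st.2.1 then (1 : Int) else 0) + (if st.2.2 then (1 : Int) else 0))

-- ===== PORT B =====
-- `_signal_date(data, key)`: the date under `key` if the inner dict and its date are truthy
def pvSigDate (data : List (String × List (String × String))) (key : String) : Option String :=
  let d := (PySem.Dict.mk data).getD key []
  if d ≠ [] ∧ ((PySem.Dict.mk d).get? "date").getD "" ≠ "" then
    some ((PySem.Dict.mk d).getD "date" "")
  else none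

def get_last_activity_py_alt (rn : String) (emails : List String) (interactions : List (String × List (String × List (String × String)))) : Option String × Int :=
  let datas := emails.map (fun email => (PySem.Dict.mk interactions).getD email [])
  let email_dates := (datas.map (fun d => pvSigDate d "last_email")).filterMap id
  let meeting_dates := (datas.map (fun d => pvSigDate d "last_meeting")).filterMap id
  let all_dates := email_dates ++ meeting_dates
  (PySem.List.max? all_dates (fun x => x),
   (if email_dates ≠ [] then (1 : Int) else 0) + (if meeting_dates ≠ [] then (1 : Int) else 0))

-- ===== PRECONDITION & SPEC =====
def Spec_get_last_activity_py (rn : String) (emails : List String) (interactions : List (String × List (String × List (String × String)))) (out : Option String × Int) : Prop := out = get_last_activity_py_alt rn emails interactions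
instance (rn : String) (emails : List String) (interactions : List (String × List (String × List (String × String)))) (out : Option String × Int) : Decidable (Spec_get_last_activity_py rn emails interactions out) := by unfold Spec_get_last_activity_py; infer_instance

-- ===== CLAIM (what is proved, stated in full; the proofs are below) =====
def Claim_equal_get_last_activity_py : Prop := ∀ (rn : String) (emails : List String) (interactions : List (String × List (String × List (String × String)))), Dom_get_last_activity_py rn emails interactions → Spec_get_last_activity_py rn emails interactions (get_last_activity_py rn emails interactions)

-- ===== LEMMAS AND PROOFS =====

-- the per-email date list A folds over, in A's (interleaved) order
def pvDl (interactions : List (String × List (String × List (String × String)))) (e : String) : List String :=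
  (pvSigDate ((PySem.Dict.mk interactions).getD e []) "last_email").toList ++
  (pvSigDate ((PySem.Dict.mk interactions).getD e []) "last_meeting").toList

theorem pvSigDate_ne_empty {data : List (String × List (String × String))} {k d : String}
    (h : pvSigDate data k = some d) : d ≠ "" := by
  unfold pvSigDate at h
  simp only [] at h
  split at h
  · rename_i hc
    cases h
    have := hc.2
    simpa [PySem.Dict.getD] using this
  · exact absurd h (by simp)

theorem pvAStep_eq (I : List (String × List (String × List (String × String))))
    (st : Option String × Bool × Bool) (e : String) :
    pvAStep I st e =
      (List.foldl pvAUpd st.1 (pvDl I e),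
       st.2.1 || (pvSigDate ((PySem.Dict.mk I).getD e []) "last_email").isSome,
       st.2.2 || (pvSigDate ((PySem.Dict.mk I).getD e []) "last_meeting").isSome) := by
  obtain ⟨l, he, hm⟩ := st
  unfold pvAStep pvDl pvSigDate
  by_cases h1 : ((PySem.Dict.mk ((PySem.Dict.mk I).getD e [])).getD "last_email" [] ≠ [] ∧
      ((PySem.Dict.mk ((PySem.Dict.mk ((PySem.Dict.mk I).getD e [])).getD "last_email" [])).get? "date").getD "" ≠ "") <;>
    by_cases h2 : ((PySem.Dict.mk ((PySem.Dict.mk I).getD e [])).getD "last_meeting" [] ≠ [] ∧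
      ((PySem.Dict.mk ((PySem.Dict.mk ((PySem.Dict.mk I).getD e [])).getD "last_meeting" [])).get? "date").getD "" ≠ "") <;>
    simp [h1, h2, List.foldl]

-- A's whole loop, abstracted
theorem pvA_fold (I : List (String × List (String × List (String × String))))
    (emails : List String) (l : Option String) (he hm : Bool) :
    emails.foldl (pvAStep I) (l, he, hm) =
      (List.foldl pvAUpd l (emails.flatMap (pvDl I)),
       he || emails.any (fun e => (pvSigDate ((PySem.Dict.mk I).getD e []) "last_email").isSome),
       hm || emails.any (fun e => (pvSigDate ((PySem.Dict.mk I).getD e []) "last_meeting").isSome)) := by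
  induction emails generalizing l he hm with
  | nil => simp
  | cons e t ih =>
    rw [List.foldl_cons, pvAStep_eq, ih]
    simp [List.foldl_append, Bool.or_assoc]

theorem pvAUpd_some {l : String} (d : String) (hl : l ≠ "") :
    pvAUpd (some l) d = some (max l d) := by
  unfold pvAUpd
  by_cases h : l < d
  · simp [h, max_eq_right (le_of_lt h)]
  · simp [h, hl, max_eq_left (le_of_not_gt h)]

theorem pvFoldl_upd_some (t : List String) (x : String) (hx : x ≠ "")
    (ht : ∀ y ∈ t, y ≠ "") :
    List.foldl pvAUpd (some x) t = some (t.foldl max x) := by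
  induction t generalizing x with
  | nil => rfl
  | cons d t' ih =>
    rw [List.foldl_cons, pvAUpd_some d hx, List.foldl_cons]
    refine ih (max x d) ?_ (fun y hy => ht y (List.mem_cons_of_mem _ hy))
    rcases max_choice x d with h | h <;> rw [h]
    · exact hx
    · exact ht d (List.mem_cons_self ..)

theorem pvFoldl_upd_none (xs : List String) (h : ∀ y ∈ xs, y ≠ "") :
    List.foldl pvAUpd none xs = PySem.List.max? xs (fun x => x) := by
  cases xs with
  | nil => rfl
  | cons x t =>
    rw [List.foldl_cons]
    show List.foldl pvAUpd (some x) t = _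
    rw [pvFoldl_upd_some t x (h x (List.mem_cons_self ..)) (fun y hy => h y (List.mem_cons_of_mem _ hy)),
      PySem.List.max?_id_cons]

-- max? depends only on membership
theorem pvMax?_congr {xs ys : List String} (h : ∀ a, a ∈ xs ↔ a ∈ ys) :
    PySem.List.max? xs (fun x => x) = PySem.List.max? ys (fun x => x) := by
  cases hx : PySem.List.max? xs (fun x => x) with
  | none =>
    rw [PySem.List.max?_eq_none_iff] at hx
    subst hx
    cases hy : PySem.List.max? ys (fun x => x) with
    | none => rfl
    | some m' =>
      have := PySem.List.max?_mem hy
      rw [← h] at this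
      simp at this
  | some m =>
    have hmem := PySem.List.max?_mem hx
    have hub := PySem.List.max?_isMax hx
    cases hy : PySem.List.max? ys (fun x => x) with
    | none =>
      rw [PySem.List.max?_eq_none_iff] at hy
      subst hy
      rw [h] at hmem
      simp at hmem
    | some m' =>
      have hmem' := PySem.List.max?_mem hy
      have hub' := PySem.List.max?_isMax hy
      have h1 : m ≤ m' := hub' m ((h m).mp hmem)
      have h2 : m' ≤ m := hub m' ((h m').mpr hmem')
      exact congrArg some (le_antisymm h2 h1).symm

-- every date either list collects is nonempty
theorem pvDl_ne_empty (I : List (String × List (String × List (String × String))))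
    (emails : List String) : ∀ y ∈ emails.flatMap (pvDl I), y ≠ "" := by
  intro y hy
  rw [List.mem_flatMap] at hy
  obtain ⟨e, _, hy⟩ := hy
  unfold pvDl at hy
  rw [List.mem_append] at hy
  rcases hy with hy | hy <;>
    · rw [Option.mem_toList] at hy
      exact pvSigDate_ne_empty hy

-- ===== VERDICT (by name: the statement is the Claim_ definition above) =====
theorem get_last_activity_py_spec : Claim_equal_get_last_activity_py := by
  intro rn emails I _
  unfold Spec_get_last_activity_py get_last_activity_py get_last_activity_py_alt
  simp only [List.filterMap_map, Function.id_comp]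
  rw [pvA_fold]
  simp only [Bool.false_or]
  have hE : emails.filterMap (fun e => pvSigDate ((PySem.Dict.mk I).getD e []) "last_email") ≠ [] ↔
      emails.any (fun e => (pvSigDate ((PySem.Dict.mk I).getD e []) "last_email").isSome) = true := by
    simp [List.any_eq_true, Option.isSome_iff_exists, Option.ne_none_iff_exists']
  have hM : emails.filterMap (fun e => pvSigDate ((PySem.Dict.mk I).getD e []) "last_meeting") ≠ [] ↔
      emails.any (fun e => (pvSigDate ((PySem.Dict.mk I).getD e []) "last_meeting").isSome) = true := by
    simp [List.any_eq_true, Option.isSome_iff_exists, Option.ne_none_iff_exists']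
  refine Prod.ext ?_ ?_
  · show List.foldl pvAUpd none (emails.flatMap (pvDl I)) = _
    rw [pvFoldl_upd_none _ (pvDl_ne_empty I emails)]
    apply pvMax?_congr
    intro a
    unfold pvDl
    simp [List.mem_flatMap, List.mem_append, List.mem_filterMap, Option.mem_toList]
    aesop
  · show (if emails.any _ = true then (1:Int) else 0) + (if emails.any _ = true then (1:Int) else 0) = _
    simp only [hE.symm, hM.symm]
    rfl
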